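-- pv_equiv track=rewrite | github.com/SHIBAM-GHOSH/DSL | assignment6.py | fast_trans
-- ===== SOURCE A (Python) =====
-- def fast_trans(spr_mat):
--     ft_mat=[[spr_mat[0][1],spr_mat[0][0],spr_mat[0][2]]]
--     count=[0]*spr_mat[0][1]
--     index=[0]*(spr_mat[0][1]+1)
--     for i in range(1,spr_mat[0][2]+1):
--         count[spr_mat[i][1]]+=1
--     index[0]=1
--     for i in range(1,spr_mat[0][1]+1):
--         index[i]=index[i-1]+count[i-1]
--     for i in range(1,spr_mat[0][2]+1):
--         ft_mat.append([0,0,0])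
--     for i in range(1,spr_mat[0][2]+1):
--         ft_mat[index[spr_mat[i][1]]]=[spr_mat[i][1],spr_mat[i][0],spr_mat[i][2]]
--         index[spr_mat[i][1]]+=1
--     return ft_mat
-- ===== SOURCE B (Python) =====
-- def fast_trans(spr_mat):
--     ft_mat = [[spr_mat[0][1], spr_mat[0][0], spr_mat[0][2]]]
--     for c in range(spr_mat[0][1]):
--         for i in range(1, spr_mat[0][2] + 1):
--             if spr_mat[i][1] == c:
--                 ft_mat.append([spr_mat[i][1], spr_mat[i][0], spr_mat[i][2]])
--     return ft_mat
-- ===== Notes on version B (the rewrite author's own statement) =====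
-- stated objective: simpler
-- what changed: Replaces the counting-sort machinery (count array, prefix-sum index table, preallocated output with a placement pass) by direct per-column scans that append matching triplets in original order.
import Mathlib
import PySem

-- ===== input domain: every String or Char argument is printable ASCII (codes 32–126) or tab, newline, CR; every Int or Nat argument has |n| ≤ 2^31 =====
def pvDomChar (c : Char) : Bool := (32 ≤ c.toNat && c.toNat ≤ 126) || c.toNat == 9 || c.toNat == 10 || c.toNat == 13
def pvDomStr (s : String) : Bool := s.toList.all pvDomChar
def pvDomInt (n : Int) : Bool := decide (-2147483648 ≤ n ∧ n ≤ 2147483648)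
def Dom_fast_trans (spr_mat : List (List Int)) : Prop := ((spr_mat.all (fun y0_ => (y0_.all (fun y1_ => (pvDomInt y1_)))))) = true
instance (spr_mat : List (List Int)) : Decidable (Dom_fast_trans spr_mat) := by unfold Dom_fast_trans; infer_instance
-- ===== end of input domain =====

-- B replaces A's counting-sort tables by per-column scans (simpler, same output; not faster).

-- ===== PORT A =====
-- Python's `xs[i] = v`: exact for 0 ≤ i < len xs (Pre_ keeps every used index there).
def pySet {α : Type} (xs : List α) (i : Int) (v : α) : List α := xs.set i.toNat v

def fast_trans (spr_mat : List (List Int)) : List (List Int) :=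
  let hd := PySem.List.pyGetD spr_mat 0 []
  let m := PySem.List.pyGetD hd 1 0
  let n := PySem.List.pyGetD hd 2 0
  let ft0 : List (List Int) := [[m, PySem.List.pyGetD hd 0 0, n]]
  let count := (PySem.List.pyRange 1 (n + 1)).foldl (fun cnt i =>
      let c := PySem.List.pyGetD (PySem.List.pyGetD spr_mat i []) 1 0
      pySet cnt c (PySem.List.pyGetD cnt c 0 + 1)) (PySem.List.pyRepeat [(0:Int)] m)
  let index0 := pySet (PySem.List.pyRepeat [(0:Int)] (m + 1)) 0 1
  let index1 := (PySem.List.pyRange 1 (m + 1)).foldl (fun idx i =>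
      pySet idx i (PySem.List.pyGetD idx (i - 1) 0 + PySem.List.pyGetD count (i - 1) 0)) index0
  let ft1 := (PySem.List.pyRange 1 (n + 1)).foldl (fun ft _ => ft ++ [[0, 0, 0]]) ft0
  let res := (PySem.List.pyRange 1 (n + 1)).foldl (fun (st : List (List Int) × List Int) i =>
      let r := PySem.List.pyGetD spr_mat i []
      let c := PySem.List.pyGetD r 1 0
      (pySet st.1 (PySem.List.pyGetD st.2 c 0)
         [c, PySem.List.pyGetD r 0 0, PySem.List.pyGetD r 2 0],
       pySet st.2 c (PySem.List.pyGetD st.2 c 0 + 1))) (ft1, index1)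
  res.1

-- ===== PORT B =====
def fast_trans_alt (spr_mat : List (List Int)) : List (List Int) :=
  let hd := PySem.List.pyGetD spr_mat 0 []
  (PySem.List.pyRange 0 (PySem.List.pyGetD hd 1 0)).foldl (fun ft c =>
    (PySem.List.pyRange 1 (PySem.List.pyGetD hd 2 0 + 1)).foldl (fun ft i =>
      let r := PySem.List.pyGetD spr_mat i []
      if PySem.List.pyGetD r 1 0 == c then
        ft ++ [[PySem.List.pyGetD r 1 0, PySem.List.pyGetD r 0 0, PySem.List.pyGetD r 2 0]]
      else ft) ft)
    [[PySem.List.pyGetD hd 1 0, PySem.List.pyGetD hd 0 0, PySem.List.pyGetD hd 2 0]]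

-- ===== PRECONDITION & SPEC =====
-- Pre_ excludes inputs on which Python A raises (missing header/rows, short rows, negative
-- column count, a column index ≥ the column count) and, beyond those, the inputs where some
-- entry has a NEGATIVE column index: there A's value is an accident of Python's
-- negative-index wraparound into the count/index/output arrays, while B drops such entries.
def Pre_fast_trans (spr_mat : List (List Int)) : Prop :=
  spr_mat ≠ [] ∧ 3 ≤ spr_mat.headI.length ∧
  0 ≤ PySem.List.pyGetD spr_mat.headI 1 0 ∧
  PySem.List.pyGetD spr_mat.headI 2 0 ≤ (spr_mat.length : Int) - 1 ∧
  ∀ r ∈ (spr_mat.drop 1).take (PySem.List.pyGetD spr_mat.headI 2 0).toNat,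
    3 ≤ r.length ∧ 0 ≤ PySem.List.pyGetD r 1 0 ∧
      PySem.List.pyGetD r 1 0 < PySem.List.pyGetD spr_mat.headI 1 0
instance (spr_mat : List (List Int)) : Decidable (Pre_fast_trans spr_mat) := by
  unfold Pre_fast_trans; infer_instance

def pvWitness_fast_trans : List (List Int) := [[5, 2, 2], [0, 1, 7], [3, 0, -4]]

def Spec_fast_trans (spr_mat : List (List Int)) (out : List (List Int)) : Prop := out = fast_trans_alt spr_mat
instance (spr_mat : List (List Int)) (out : List (List Int)) : Decidable (Spec_fast_trans spr_mat out) := by unfold Spec_fast_trans; infer_instance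

-- ===== CLAIM (what is proved, stated in full; the proofs are below) =====
def Claim_equal_fast_trans : Prop := ∀ (spr_mat : List (List Int)), Dom_fast_trans spr_mat → Pre_fast_trans spr_mat → Spec_fast_trans spr_mat (fast_trans spr_mat)

-- ===== LEMMAS AND PROOFS =====

-- abbreviations for the proofs
def colOf (r : List Int) : Int := PySem.List.pyGetD r 1 0
def swapOf (r : List Int) : List Int :=
  [colOf r, PySem.List.pyGetD r 0 0, PySem.List.pyGetD r 2 0]


-- basic facts about pySet / pyGetD
theorem pySet_length {α : Type} (xs : List α) (i : Int) (v : α) :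
    (pySet xs i v).length = xs.length := by simp [pySet]

theorem pyGetD_pySet_self {α : Type} (xs : List α) (i : Int) (v d : α)
    (h0 : 0 ≤ i) (h1 : i < (xs.length : Int)) :
    PySem.List.pyGetD (pySet xs i v) i d = v := by
  rw [PySem.List.pyGetD_of_nonneg _ _ h0]
  have : i.toNat < xs.length := by omega
  simp [pySet, List.getD, this]

theorem pyGetD_pySet_ne {α : Type} (xs : List α) (i j : Int) (v d : α)
    (h0 : 0 ≤ i) (h0' : 0 ≤ j) (hne : i ≠ j) :
    PySem.List.pyGetD (pySet xs i v) j d = PySem.List.pyGetD xs j d := by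
  rw [PySem.List.pyGetD_of_nonneg _ _ h0', PySem.List.pyGetD_of_nonneg _ _ h0']
  have : i.toNat ≠ j.toNat := by omega
  simp [pySet, List.getD, List.getElem?_set_ne this]

-- telescoping count: entries with column < c+1 = (column < c) + (column = c)
theorem countP_lt_succ (es : List (List Int)) (c : Int) :
    es.countP (fun r => decide (colOf r < c + 1))
      = es.countP (fun r => decide (colOf r < c)) + es.countP (fun r => colOf r == c) := by
  induction es with
  | nil => simp
  | cons r es ih =>
    simp only [List.countP_cons, ih]
    by_cases h1 : colOf r < c
    · have h2 : colOf r < c + 1 := by omega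
      have h3 : ¬ (colOf r == c) = true := by simp; omega
      simp [h1, h2, h3]; omega
    · by_cases h2 : colOf r = c
      · simp [h2]; omega
      · have h3 : ¬ colOf r < c + 1 := by omega
        have h4 : ¬ (colOf r == c) = true := by simp [h2]
        simp [h1, h3, h4]

-- strict monotonicity facts about countP on prefixes
theorem take_countP_lt {α : Type} (l : List α) (p : α → Bool) (k : Nat)
    (hk : k < l.length) (hp : p l[k] = true) :
    (l.take k).countP p < l.countP p := by
  conv_rhs => rw [← List.take_append_drop k l]
  rw [List.countP_append]
  have hdrop : l.drop k = l[k] :: l.drop (k + 1) := (List.getElem_cons_drop hk).symm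
  rw [hdrop, List.countP_cons, hp]
  simp

theorem take_countP_mono_strict {α : Type} (l : List α) (p : α → Bool) (k1 k2 : Nat)
    (h12 : k1 < k2) (hk1 : k1 < l.length) (hp : p l[k1] = true) :
    (l.take k1).countP p < (l.take k2).countP p := by
  have h : l.take k2 = l.take k1 ++ (l.drop k1).take (k2 - k1) := by
    rw [← List.take_add]
    congr 1
    omega
  rw [h, List.countP_append]
  have hdrop : l.drop k1 = l[k1] :: l.drop (k1 + 1) := (List.getElem_cons_drop hk1).symm
  have h1 : 0 < k2 - k1 := by omega
  obtain ⟨j, hj⟩ : ∃ j, k2 - k1 = j + 1 := ⟨k2 - k1 - 1, by omega⟩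
  rw [hdrop, hj, List.take_succ_cons, List.countP_cons, hp]
  simp


-- the write list produced by A's placement loop: (position, transposed triplet) pairs
def posvals : List (List Int) → List Int → List (Nat × List Int)
  | [], _ => []
  | r :: es, idx =>
      ((PySem.List.pyGetD idx (colOf r) 0).toNat, swapOf r)
        :: posvals es (pySet idx (colOf r) (PySem.List.pyGetD idx (colOf r) 0 + 1))

theorem posvals_length (es : List (List Int)) (idx : List Int) :
    (posvals es idx).length = es.length := by
  induction es generalizing idx with
  | nil => rfl
  | cons r es ih => simp [posvals, ih]

-- A's placement loop is the fold of single writes over `posvals`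
theorem place_fold (es : List (List Int)) (ft : List (List Int)) (idx : List Int) :
    (es.foldl (fun (st : List (List Int) × List Int) r =>
        (pySet st.1 (PySem.List.pyGetD st.2 (colOf r) 0) (swapOf r),
         pySet st.2 (colOf r) (PySem.List.pyGetD st.2 (colOf r) 0 + 1))) (ft, idx)).1
      = (posvals es idx).foldl (fun f w => f.set w.1 w.2) ft := by
  induction es generalizing ft idx with
  | nil => rfl
  | cons r es ih => simp only [List.foldl_cons, posvals, ih]; rfl

-- position/value of the k-th write, in terms of the INITIAL index table
theorem posvals_getElem? (es : List (List Int)) (idx : List Int) (k : Nat)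
    (hk : k < es.length)
    (hes : ∀ r ∈ es, 0 ≤ colOf r ∧ colOf r < (idx.length : Int)) :
    (posvals es idx)[k]? = some
      ((PySem.List.pyGetD idx (colOf es[k]) 0
          + ((es.take k).countP (fun r => colOf r == colOf es[k]) : Int)).toNat,
        swapOf es[k]) := by
  induction es generalizing k idx with
  | nil => simp at hk
  | cons r es ih =>
    match k with
    | 0 => simp [posvals]
    | k + 1 =>
      have hk' : k < es.length := by simpa using hk
      have hes' : ∀ r' ∈ es, 0 ≤ colOf r' ∧ colOf r' < ((pySet idx (colOf r)
          (PySem.List.pyGetD idx (colOf r) 0 + 1)).length : Int) := by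
        intro r' hr'
        rw [pySet_length]
        exact hes r' (List.mem_cons_of_mem _ hr')
      have hr := hes r (List.mem_cons_self ..)
      have hk2 : ((r :: es)[k+1] : List Int) = es[k] := by simp
      simp only [posvals, List.getElem?_cons_succ, ih _ _ hk' hes', hk2]
      have hek := hes es[k] (List.mem_cons_of_mem _ (List.getElem_mem hk'))
      by_cases hc : colOf r = colOf es[k]
      · rw [hc, pyGetD_pySet_self _ _ _ _ hek.1 hek.2]
        have : (r :: es).take (k+1) = r :: es.take k := rfl
        rw [this, List.countP_cons]
        have : (colOf r == colOf es[k]) = true := by simp [hc]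
        rw [this]
        simp
        omega
      · rw [pyGetD_pySet_ne _ _ _ _ _ hr.1 hek.1 hc]
        have : (r :: es).take (k+1) = r :: es.take k := rfl
        rw [this, List.countP_cons]
        have : (colOf r == colOf es[k]) = false := by simp [hc]
        rw [this]
        simp

-- folds of single writes
theorem foldl_set_length {α : Type} (ws : List (Nat × α)) (ft : List α) :
    (ws.foldl (fun f w => f.set w.1 w.2) ft).length = ft.length := by
  induction ws generalizing ft with
  | nil => rfl
  | cons w ws ih => simp [ih]

theorem foldl_set_getElem?_not_mem {α : Type} (ws : List (Nat × α)) (ft : List α) (q : Nat)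
    (h : ∀ w ∈ ws, w.1 ≠ q) :
    (ws.foldl (fun f w => f.set w.1 w.2) ft)[q]? = ft[q]? := by
  induction ws generalizing ft with
  | nil => rfl
  | cons w ws ih =>
    rw [List.foldl_cons, ih _ (fun w' hw' => h w' (List.mem_cons_of_mem _ hw'))]
    exact List.getElem?_set_ne (h w (List.mem_cons_self ..))

theorem foldl_set_getElem?_mid {α : Type} (l1 l2 : List (Nat × α)) (w : Nat × α) (ft : List α)
    (hq : w.1 < ft.length) (h : ∀ w' ∈ l2, w'.1 ≠ w.1) :
    ((l1 ++ w :: l2).foldl (fun f w => f.set w.1 w.2) ft)[w.1]? = some w.2 := by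
  rw [List.foldl_append, List.foldl_cons]
  rw [foldl_set_getElem?_not_mem _ _ _ h]
  rw [List.getElem?_set_self]
  rw [foldl_set_length]
  exact hq

theorem foldl_set_getElem?_at {α : Type} (ws : List (Nat × α)) (ft : List α) (k : Nat)
    (hk : k < ws.length) (hq : ws[k].1 < ft.length)
    (h : ∀ j, k < j → (hj : j < ws.length) → ws[j].1 ≠ ws[k].1) :
    (ws.foldl (fun f w => f.set w.1 w.2) ft)[ws[k].1]? = some ws[k].2 := by
  have hsplit : ws = ws.take k ++ ws[k] :: ws.drop (k + 1) := by
    conv_lhs => rw [← List.take_append_drop k ws]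
    rw [List.getElem_cons_drop hk]
  have hmem : ∀ w' ∈ ws.drop (k + 1), w'.1 ≠ ws[k].1 := by
    intro w hw
    obtain ⟨t, ht, hwt⟩ := List.getElem_of_mem hw
    have h1 : (ws.drop (k+1))[t] = ws[k+1+t]'(by simp only [List.length_drop] at ht; omega) := by
      rw [List.getElem_drop]
    subst hwt
    rw [h1]
    exact h (k+1+t) (by omega) _
  have := foldl_set_getElem?_mid (ws.take k) (ws.drop (k+1)) ws[k] ft hq hmem
  rw [← hsplit] at this
  exact this


-- A's counting pass: final count array holds per-column occurrence counts
theorem count_fold_length (es : List (List Int)) (cnt : List Int) :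
    (es.foldl (fun cnt r =>
        pySet cnt (colOf r) (PySem.List.pyGetD cnt (colOf r) 0 + 1)) cnt).length
      = cnt.length := by
  induction es generalizing cnt with
  | nil => rfl
  | cons r es ih => rw [List.foldl_cons, ih, pySet_length]

theorem count_fold_getElem (es : List (List Int)) (cnt : List Int)
    (hes : ∀ r ∈ es, 0 ≤ colOf r ∧ colOf r < (cnt.length : Int))
    (c : Int) (h0 : 0 ≤ c) (hc : c < (cnt.length : Int)) :
    PySem.List.pyGetD (es.foldl (fun cnt r =>
        pySet cnt (colOf r) (PySem.List.pyGetD cnt (colOf r) 0 + 1)) cnt) c 0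
      = PySem.List.pyGetD cnt c 0 + es.countP (fun r => colOf r == c) := by
  induction es generalizing cnt with
  | nil => simp
  | cons r es ih =>
    have hr := hes r (List.mem_cons_self ..)
    have hes' : ∀ r' ∈ es, 0 ≤ colOf r' ∧ colOf r' <
        ((pySet cnt (colOf r) (PySem.List.pyGetD cnt (colOf r) 0 + 1)).length : Int) := by
      intro r' hr'; rw [pySet_length]; exact hes r' (List.mem_cons_of_mem _ hr')
    rw [List.foldl_cons, ih _ hes' (by rwa [pySet_length] : c < _)]
    rw [List.countP_cons]
    by_cases hcc : colOf r = c
    · rw [hcc, pyGetD_pySet_self _ _ _ _ h0 hc]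
      simp
      omega
    · rw [pyGetD_pySet_ne _ _ _ _ _ hr.1 h0 hcc]
      have : (colOf r == c) = false := by simp [hcc]
      rw [this]
      simp

-- A's prefix-sum pass
def idxFold (cntArr m0 : List Int) (j : Int) : List Int :=
  (PySem.List.pyRange 1 (j + 1)).foldl (fun idx i =>
    pySet idx i (PySem.List.pyGetD idx (i - 1) 0 + PySem.List.pyGetD cntArr (i - 1) 0)) m0

theorem idxFold_length (cntArr m0 : List Int) (j : Int) :
    (idxFold cntArr m0 j).length = m0.length := by
  unfold idxFold
  generalize PySem.List.pyRange 1 (j + 1) = l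
  induction l generalizing m0 with
  | nil => rfl
  | cons i l ih => rw [List.foldl_cons, ih, pySet_length]

theorem idxFold_getElem (m' : Nat) (cntArr : List Int) (es : List (List Int))
    (_hlen : cntArr.length = m')
    (hcnt : ∀ c : Nat, c < m' →
      PySem.List.pyGetD cntArr (c : Int) 0 = es.countP (fun r => colOf r == (c : Int)))
    (hes : ∀ r ∈ es, 0 ≤ colOf r)
    (j : Nat) (hj : j ≤ m') :
    ∀ c : Nat, c ≤ j →
      PySem.List.pyGetD (idxFold cntArr (pySet (List.replicate (m' + 1) (0 : Int)) 0 1) (j : Int)) (c : Int) 0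
        = 1 + es.countP (fun r => decide (colOf r < (c : Int))) := by
  induction j with
  | zero =>
    intro c hc
    interval_cases c
    have h1 : idxFold cntArr (pySet (List.replicate (m' + 1) (0 : Int)) 0 1) ((0 : Nat) : Int)
        = pySet (List.replicate (m' + 1) (0 : Int)) 0 1 := by
      unfold idxFold
      norm_num
    rw [h1]
    simp only [Nat.cast_zero]
    have hlen1 : (0 : Int) < ((List.replicate (m' + 1) (0 : Int)).length : Int) := by simp
    rw [pyGetD_pySet_self _ _ _ _ le_rfl hlen1]
    have h0 : es.countP (fun r => decide (colOf r < (0 : Int))) = 0 := by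
      rw [List.countP_eq_zero]
      intro r hr
      have := hes r hr
      simp
      omega
    rw [h0]
    simp
  | succ j ihj =>
    intro c hc
    have hstep : idxFold cntArr (pySet (List.replicate (m' + 1) (0 : Int)) 0 1) ((j + 1 : Nat) : Int)
        = pySet (idxFold cntArr (pySet (List.replicate (m' + 1) (0 : Int)) 0 1) (j : Int)) ((j : Int) + 1)
            (PySem.List.pyGetD (idxFold cntArr (pySet (List.replicate (m' + 1) (0 : Int)) 0 1) (j : Int)) ((j : Int) + 1 - 1) 0
              + PySem.List.pyGetD cntArr ((j : Int) + 1 - 1) 0) := by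
      unfold idxFold
      have : ((j + 1 : Nat) : Int) + 1 = ((j : Int) + 1) + 1 := by push_cast; ring
      rw [this, PySem.List.pyRange_one_succ_right (by omega), List.foldl_append, List.foldl_cons,
        List.foldl_nil]
    rw [hstep]
    have hlenI : ((idxFold cntArr (pySet (List.replicate (m' + 1) (0 : Int)) 0 1) (j : Int)).length : Int)
        = (m' : Int) + 1 := by
      rw [idxFold_length, pySet_length]
      simp
    have hsimpl : (j : Int) + 1 - 1 = (j : Int) := by ring
    rw [hsimpl]
    by_cases hcj : c = j + 1
    · subst hcj
      have hcast : ((j + 1 : Nat) : Int) = (j : Int) + 1 := by push_cast; ring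
      rw [hcast, pyGetD_pySet_self _ _ _ _ (by omega) (by omega)]
      rw [ihj (by omega) j le_rfl, hcnt j (by omega)]
      have := countP_lt_succ es (j : Int)
      omega
    · have hcj' : c ≤ j := by omega
      have hne : (j : Int) + 1 ≠ (c : Int) := by omega
      rw [pyGetD_pySet_ne _ _ _ _ _ (by omega) (by omega) hne]
      exact ihj (by omega) c hcj'

-- the final position of entry k in the transposed order
def posOf (es : List (List Int)) (k : Nat) : Nat :=
  es.countP (fun r => decide (colOf r < colOf (es.getD k [])))
    + (es.take k).countP (fun r => colOf r == colOf (es.getD k []))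

theorem posOf_lt (es : List (List Int)) (k : Nat) (hk : k < es.length) :
    posOf es k < es.length := by
  unfold posOf
  rw [List.getD_eq_getElem es [] hk]
  have h1 := take_countP_lt es (fun r => colOf r == colOf es[k]) k hk (by simp)
  have h2 := countP_lt_succ es (colOf es[k])
  have h3 := List.countP_le_length (p := fun r => decide (colOf r < colOf es[k] + 1)) (l := es)
  omega

theorem posOf_lt_of_col_lt (es : List (List Int)) (k1 k2 : Nat)
    (hk1 : k1 < es.length) (hk2 : k2 < es.length)
    (h : colOf es[k1] < colOf es[k2]) :
    posOf es k1 < posOf es k2 := by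
  unfold posOf
  rw [List.getD_eq_getElem es [] hk1, List.getD_eq_getElem es [] hk2]
  have h1 := take_countP_lt es (fun r => colOf r == colOf es[k1]) k1 hk1 (by simp)
  have h2 := countP_lt_succ es (colOf es[k1])
  have h3 : es.countP (fun r => decide (colOf r < colOf es[k1] + 1))
      ≤ es.countP (fun r => decide (colOf r < colOf es[k2])) := by
    apply List.countP_mono_left
    intro r _ hr
    simp at hr ⊢
    omega
  omega

theorem posOf_inj (es : List (List Int)) (k1 k2 : Nat)
    (hk1 : k1 < es.length) (hk2 : k2 < es.length)
    (h : posOf es k1 = posOf es k2) : k1 = k2 := by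
  rcases Nat.lt_trichotomy k1 k2 with hlt | heq | hgt
  · exfalso
    rcases lt_trichotomy (colOf es[k1]) (colOf es[k2]) with hc | hc | hc
    · exact absurd h (Nat.ne_of_lt (posOf_lt_of_col_lt es k1 k2 hk1 hk2 hc))
    · unfold posOf at h
      rw [List.getD_eq_getElem es [] hk1, List.getD_eq_getElem es [] hk2, hc] at h
      have := take_countP_mono_strict es (fun r => colOf r == colOf es[k2]) k1 k2 hlt hk1
        (by simp only [hc]; simp)
      omega
    · exact absurd h.symm (Nat.ne_of_lt (posOf_lt_of_col_lt es k2 k1 hk2 hk1 hc))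
  · exact heq
  · exfalso
    rcases lt_trichotomy (colOf es[k1]) (colOf es[k2]) with hc | hc | hc
    · exact absurd h (Nat.ne_of_lt (posOf_lt_of_col_lt es k1 k2 hk1 hk2 hc))
    · unfold posOf at h
      rw [List.getD_eq_getElem es [] hk1, List.getD_eq_getElem es [] hk2, hc] at h
      have := take_countP_mono_strict es (fun r => colOf r == colOf es[k2]) k2 k1 hgt hk2
        (by simp)
      omega
    · exact absurd h.symm (Nat.ne_of_lt (posOf_lt_of_col_lt es k2 k1 hk2 hk1 hc))

-- the k-th stable occurrence inside a filter
theorem filter_take_getElem? {α : Type} (l : List α) (p : α → Bool) (k : Nat)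
    (hk : k < l.length) (hp : p l[k] = true) :
    (l.filter p)[(l.take k).countP p]? = some l[k] := by
  induction l generalizing k with
  | nil => simp at hk
  | cons x t ih =>
    match k with
    | 0 =>
      simp only [List.take_zero, List.countP_nil]
      simp only [List.getElem_cons_zero] at hp
      rw [List.filter_cons_of_pos hp]
      rfl
    | k + 1 =>
      have hk' : k < t.length := by simpa using hk
      have hp' : p t[k] = true := by simpa using hp
      rw [List.take_succ_cons, List.countP_cons]
      by_cases hx : p x
      · rw [List.filter_cons_of_pos hx, hx]
        simp only []
        simpa using ih k hk' hp'
      · rw [List.filter_cons_of_neg (by simpa using hx)]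
        have : (if p x = true then 1 else 0) = 0 := by simp [hx]
        rw [this, Nat.add_zero]
        simpa using ih k hk' hp'

-- B's output body: per-column groups, concatenated
def groupsOf (es : List (List Int)) (m' : Nat) : List (List Int) :=
  (List.range m').flatMap (fun (c : Nat) => (es.filter (fun r => colOf r == (c : Int))).map swapOf)

theorem groupsOf_length_prefix (es : List (List Int)) (hes : ∀ r ∈ es, 0 ≤ colOf r) (c' : Nat) :
    (groupsOf es c').length = es.countP (fun r => decide (colOf r < (c' : Int))) := by
  induction c' with
  | zero =>
    simp [groupsOf]
    symm
    rw [List.countP_eq_zero]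
    intro r hr
    have := hes r hr
    simp
    omega
  | succ c' ih =>
    unfold groupsOf at ih ⊢
    rw [List.range_succ, List.flatMap_append, List.length_append, ih]
    have hcast : ((c' + 1 : Nat) : Int) = (c' : Int) + 1 := by push_cast; ring
    rw [hcast, countP_lt_succ]
    simp [List.countP_eq_length_filter]

theorem groupsOf_length (es : List (List Int)) (m' : Nat)
    (hes0 : ∀ r ∈ es, 0 ≤ colOf r) (hes : ∀ r ∈ es, colOf r < (m' : Int)) :
    (groupsOf es m').length = es.length := by
  rw [groupsOf_length_prefix es hes0]
  rw [List.countP_eq_length]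
  intro r hr
  simp
  exact hes r hr

theorem groupsOf_getElem? (es : List (List Int)) (m' : Nat) (k : Nat)
    (hes : ∀ r ∈ es, 0 ≤ colOf r)
    (hk : k < es.length) (c' : Nat) (hc : colOf es[k] = (c' : Int)) (hcm : c' < m') :
    (groupsOf es m')[posOf es k]? = some (swapOf es[k]) := by
  have hsplit : List.range m' = List.range c' ++ c' :: List.range' (c' + 1) (m' - c' - 1) := by
    rw [List.range_eq_range']
    have h1 : m' = c' + (m' - c') := by omega
    rw [h1, ← List.range'_append (s := 0) (m := c') (n := m' - c') (step := 1)]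
    congr 1
    · rw [← List.range_eq_range']
    · have h2 : m' - c' = (m' - c' - 1) + 1 := by omega
      rw [h2, List.range'_succ]
      norm_num
  unfold groupsOf
  rw [hsplit, List.flatMap_append, List.flatMap_cons]
  have hpre : ((List.range c').flatMap
      (fun (c : Nat) => (es.filter (fun r => colOf r == (c : Int))).map swapOf)).length
      = es.countP (fun r => decide (colOf r < (c' : Int))) := groupsOf_length_prefix es hes c'
  have hposOf : posOf es k = es.countP (fun r => decide (colOf r < (c' : Int)))
      + (es.take k).countP (fun r => colOf r == (c' : Int)) := by
    unfold posOf
    rw [List.getD_eq_getElem es [] hk, hc]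
  rw [hposOf, List.getElem?_append_right (by omega), hpre]
  have harith : es.countP (fun r => decide (colOf r < (c' : Int)))
      + (es.take k).countP (fun r => colOf r == (c' : Int))
      - es.countP (fun r => decide (colOf r < (c' : Int)))
      = (es.take k).countP (fun r => colOf r == (c' : Int)) := by omega
  rw [harith]
  have htlt : (es.take k).countP (fun r => colOf r == (c' : Int))
      < ((es.filter (fun r => colOf r == (c' : Int))).map swapOf).length := by
    rw [List.length_map, ← List.countP_eq_length_filter]
    exact take_countP_lt es _ k hk (by simp [hc])
  rw [List.getElem?_append_left htlt]
  rw [List.getElem?_map]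
  rw [filter_take_getElem? es _ k hk (by simp [hc])]
  rfl


-- bridges between index loops over pyRange and loops over the entry rows
theorem pyRange_one_map_cast (n' : Nat) :
    PySem.List.pyRange 1 ((n' : Int) + 1) = (List.range n').map (fun (k : Nat) => ((k : Int) + 1)) := by
  induction n' with
  | zero => rfl
  | succ n' ih =>
    have hc : ((n' + 1 : Nat) : Int) + 1 = ((n' : Int) + 1) + 1 := by push_cast; ring
    rw [hc, PySem.List.pyRange_one_succ_right (by omega), ih, List.range_succ, List.map_append]
    rfl

theorem pyGetD_cons_succ {α : Type} (x : α) (xs : List α) (i : Int) (d : α) (hi : 0 ≤ i) :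
    PySem.List.pyGetD (x :: xs) (i + 1) d = PySem.List.pyGetD xs i d := by
  rw [PySem.List.pyGetD_of_nonneg _ _ (by omega), PySem.List.pyGetD_of_nonneg _ _ hi]
  have : (i + 1).toNat = i.toNat + 1 := by omega
  rw [this]
  rfl

theorem map_pyGetD_cons_range (h : List Int) (t : List (List Int)) (n : Int)
    (hn : n ≤ (t.length : Int)) :
    (PySem.List.pyRange 1 (n + 1)).map (fun i => PySem.List.pyGetD (h :: t) i [])
      = t.take n.toNat := by
  by_cases h0 : n ≤ 0
  · rw [PySem.List.pyRange_one_eq_nil (by omega)]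
    have : n.toNat = 0 := by omega
    rw [this]
    rfl
  · obtain ⟨n', hn'⟩ : ∃ n' : Nat, n = (n' : Int) := ⟨n.toNat, by omega⟩
    subst hn'
    rw [pyRange_one_map_cast, List.map_map]
    apply List.ext_getElem
    · simp
      omega
    · intro i h1 h2
      simp only [List.getElem_map, List.getElem_range, Function.comp_apply]
      have hi1 : i < n' := by simpa using h1
      have hit : i < t.length := by
        simp at h2
        omega
      rw [pyGetD_cons_succ _ _ _ _ (by omega)]
      rw [PySem.List.pyGetD_eq_getElem _ _ (by omega) (by simpa using hit)]
      simp [List.getElem_take]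

theorem length_pyRange_one (n : Int) (t : List (List Int)) (h : List Int)
    (hn : n ≤ (t.length : Int)) :
    (PySem.List.pyRange 1 (n + 1)).length = (t.take n.toNat).length := by
  rw [← map_pyGetD_cons_range h t n hn, List.length_map]


-- B in canonical form: header followed by the per-column groups
theorem fast_trans_alt_canon (h : List Int) (t : List (List Int))
    (hm : 0 ≤ PySem.List.pyGetD h 1 0)
    (hn : PySem.List.pyGetD h 2 0 ≤ (t.length : Int)) :
    fast_trans_alt (h :: t)
      = [PySem.List.pyGetD h 1 0, PySem.List.pyGetD h 0 0, PySem.List.pyGetD h 2 0]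
          :: groupsOf (t.take (PySem.List.pyGetD h 2 0).toNat) (PySem.List.pyGetD h 1 0).toNat := by
  have hhd : PySem.List.pyGetD (h :: t) 0 [] = h := by
    rw [PySem.List.pyGetD_of_nonneg _ _ le_rfl]; rfl
  simp only [fast_trans_alt, hhd]
  have hinner : ∀ (c : Int) (init : List (List Int)),
      (PySem.List.pyRange 1 (PySem.List.pyGetD h 2 0 + 1)).foldl (fun ft i =>
        if PySem.List.pyGetD (PySem.List.pyGetD (h :: t) i []) 1 0 == c then
          ft ++ [[PySem.List.pyGetD (PySem.List.pyGetD (h :: t) i []) 1 0,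
                  PySem.List.pyGetD (PySem.List.pyGetD (h :: t) i []) 0 0,
                  PySem.List.pyGetD (PySem.List.pyGetD (h :: t) i []) 2 0]]
        else ft) init
      = init ++ ((t.take (PySem.List.pyGetD h 2 0).toNat).filter
          (fun r => colOf r == c)).map swapOf := by
    intro c init
    calc (PySem.List.pyRange 1 (PySem.List.pyGetD h 2 0 + 1)).foldl (fun ft i =>
        if PySem.List.pyGetD (PySem.List.pyGetD (h :: t) i []) 1 0 == c then
          ft ++ [[PySem.List.pyGetD (PySem.List.pyGetD (h :: t) i []) 1 0,
                  PySem.List.pyGetD (PySem.List.pyGetD (h :: t) i []) 0 0,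
                  PySem.List.pyGetD (PySem.List.pyGetD (h :: t) i []) 2 0]]
        else ft) init
        = ((PySem.List.pyRange 1 (PySem.List.pyGetD h 2 0 + 1)).map
            (fun i => PySem.List.pyGetD (h :: t) i [])).foldl
            (fun ft r => if colOf r == c then ft ++ [swapOf r] else ft) init :=
          by rw [List.foldl_map]; rfl
      _ = (t.take (PySem.List.pyGetD h 2 0).toNat).foldl
            (fun ft r => if colOf r == c then ft ++ [swapOf r] else ft) init := by
          rw [map_pyGetD_cons_range h t _ hn]
      _ = init ++ ((t.take (PySem.List.pyGetD h 2 0).toNat).filter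
            (fun r => colOf r == c)).map swapOf :=
          PySem.List.foldl_append_if (fun r => colOf r == c) swapOf _ init
  rw [PySem.List.foldl_congr_mem _ _
    (fun ft c => ft ++ ((t.take (PySem.List.pyGetD h 2 0).toNat).filter
      (fun r => colOf r == c)).map swapOf) _ (fun acc c _ => hinner c acc)]
  rw [PySem.List.foldl_append_eq_flatMap]
  conv_lhs => rw [show PySem.List.pyGetD h 1 0 = (((PySem.List.pyGetD h 1 0).toNat : Nat) : Int)
    from (Int.toNat_of_nonneg hm).symm]
  rw [PySem.List.pyRange_zero_natCast, List.flatMap_map]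
  simp only [List.singleton_append, groupsOf, Int.toNat_of_nonneg hm]


theorem posOf_surj (es : List (List Int)) (j : Nat) (hj : j < es.length) :
    ∃ k, ∃ _ : k < es.length, posOf es k = j := by
  have hsurj : Function.Surjective
      (fun k : Fin es.length => (⟨posOf es k, posOf_lt es k k.2⟩ : Fin es.length)) := by
    rw [← Finite.injective_iff_surjective]
    intro k1 k2 hk
    exact Fin.ext (posOf_inj es k1 k2 k1.2 k2.2 (by simpa using congrArg Fin.val hk))
  obtain ⟨k, hk⟩ := hsurj ⟨j, hj⟩
  exact ⟨k, k.2, by simpa using congrArg Fin.val hk⟩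

-- the heart: A's placement writes produce exactly the per-column groups
theorem place_eq_groups (es : List (List Int)) (m' : Nat) (idxF : List Int) (hdr : List Int)
    (hes : ∀ r ∈ es, 0 ≤ colOf r ∧ colOf r < (m' : Int))
    (hlenI : idxF.length = m' + 1)
    (hidx : ∀ c : Nat, c ≤ m' →
      PySem.List.pyGetD idxF (c : Int) 0
        = 1 + es.countP (fun r => decide (colOf r < (c : Int)))) :
    (posvals es idxF).foldl (fun f w => f.set w.1 w.2)
        (hdr :: List.replicate es.length ([0, 0, 0] : List Int))
      = hdr :: groupsOf es m' := by
  have hes0 : ∀ r ∈ es, 0 ≤ colOf r := fun r hr => (hes r hr).1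
  have hesI : ∀ r ∈ es, 0 ≤ colOf r ∧ colOf r < (idxF.length : Int) := by
    intro r hr
    refine ⟨(hes r hr).1, ?_⟩
    rw [hlenI]
    have := (hes r hr).2
    push_cast
    omega
  have hw : ∀ k, (hk : k < es.length) →
      (posvals es idxF)[k]? = some (1 + posOf es k, swapOf es[k]) := by
    intro k hk
    rw [posvals_getElem? es idxF k hk hesI]
    have hc0 := (hes es[k] (List.getElem_mem hk)).1
    have hcm := (hes es[k] (List.getElem_mem hk)).2
    obtain ⟨c', hc'⟩ : ∃ c' : Nat, colOf es[k] = (c' : Int) := ⟨(colOf es[k]).toNat, by omega⟩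
    have hcm' : c' ≤ m' := by omega
    rw [hc', hidx c' hcm']
    have hpos : posOf es k = es.countP (fun r => decide (colOf r < (c' : Int)))
        + (es.take k).countP (fun r => colOf r == (c' : Int)) := by
      unfold posOf
      rw [List.getD_eq_getElem es [] hk, hc']
    congr 2
    omega
  apply List.ext_getElem?
  intro q
  match q with
  | 0 =>
    rw [foldl_set_getElem?_not_mem]
    · rfl
    · intro w hwmem
      obtain ⟨k, hk, hwk⟩ := List.getElem_of_mem hwmem
      have hk' : k < es.length := by rwa [posvals_length] at hk
      have := hw k hk'
      rw [List.getElem?_eq_getElem hk, hwk] at this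
      have : w = (1 + posOf es k, swapOf es[k]) := by
        injection this
      rw [this]
      simp
  | q + 1 =>
    by_cases hq : q < es.length
    · obtain ⟨k, hk, hpos⟩ := posOf_surj es q hq
      have hwk := hw k hk
      have hklen : k < (posvals es idxF).length := by rwa [posvals_length]
      have hwkE : (posvals es idxF)[k] = (1 + posOf es k, swapOf es[k]) := by
        rw [List.getElem?_eq_getElem hklen] at hwk
        injection hwk
      have hfin := foldl_set_getElem?_at (posvals es idxF)
          (hdr :: List.replicate es.length ([0, 0, 0] : List Int)) k hklen
          (by rw [hwkE]; simp; have := posOf_lt es k hk; omega)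
          (by
            intro j hkj hjlen
            have hj' : j < es.length := by rwa [posvals_length] at hjlen
            have hwj := hw j hj'
            rw [List.getElem?_eq_getElem hjlen] at hwj
            have hwjE : (posvals es idxF)[j] = (1 + posOf es j, swapOf es[j]) := by injection hwj
            rw [hwjE, hwkE]
            simp only [ne_eq]
            intro hcontra
            have : posOf es j = posOf es k := by omega
            exact absurd (posOf_inj es j k hj' hk this) (by omega))
      rw [hwkE] at hfin
      have hq1 : 1 + posOf es k = q + 1 := by omega
      rw [hq1] at hfin
      rw [hfin]
      rw [List.getElem?_cons_succ, ← hpos]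
      have hc0 := (hes es[k] (List.getElem_mem hk)).1
      have hcm := (hes es[k] (List.getElem_mem hk)).2
      obtain ⟨c', hc'⟩ : ∃ c' : Nat, colOf es[k] = (c' : Int) := ⟨(colOf es[k]).toNat, by omega⟩
      exact (groupsOf_getElem? es m' k hes0 hk c' hc' (by omega)).symm
    · rw [List.getElem?_eq_none, List.getElem?_eq_none]
      · simp only [List.length_cons]
        rw [groupsOf_length es m' hes0 (fun r hr => (hes r hr).2)]
        omega
      · rw [foldl_set_length]
        simp
        omega


-- A in canonical form: the same header and per-column groups
theorem fast_trans_canon (h : List Int) (t : List (List Int))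
    (hm : 0 ≤ PySem.List.pyGetD h 1 0)
    (hn : PySem.List.pyGetD h 2 0 ≤ (t.length : Int))
    (hes : ∀ r ∈ t.take (PySem.List.pyGetD h 2 0).toNat,
      0 ≤ colOf r ∧ colOf r < PySem.List.pyGetD h 1 0) :
    fast_trans (h :: t)
      = [PySem.List.pyGetD h 1 0, PySem.List.pyGetD h 0 0, PySem.List.pyGetD h 2 0]
          :: groupsOf (t.take (PySem.List.pyGetD h 2 0).toNat) (PySem.List.pyGetD h 1 0).toNat := by
  have hhd : PySem.List.pyGetD (h :: t) 0 [] = h := by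
    rw [PySem.List.pyGetD_of_nonneg _ _ le_rfl]; rfl
  have hes0 : ∀ r ∈ t.take (PySem.List.pyGetD h 2 0).toNat, 0 ≤ colOf r :=
    fun r hr => (hes r hr).1
  have hesN : ∀ r ∈ t.take (PySem.List.pyGetD h 2 0).toNat,
      0 ≤ colOf r ∧ colOf r < (((PySem.List.pyGetD h 1 0).toNat : Nat) : Int) := by
    intro r hr
    have := hes r hr
    constructor
    · exact this.1
    · omega
  simp only [fast_trans, hhd]
  -- the counting pass
  have hCNT : (PySem.List.pyRange 1 (PySem.List.pyGetD h 2 0 + 1)).foldl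
      (fun cnt i =>
        pySet cnt (PySem.List.pyGetD (PySem.List.pyGetD (h :: t) i []) 1 0)
          (PySem.List.pyGetD cnt (PySem.List.pyGetD (PySem.List.pyGetD (h :: t) i []) 1 0) 0 + 1))
      (PySem.List.pyRepeat [(0:Int)] (PySem.List.pyGetD h 1 0))
      = (t.take (PySem.List.pyGetD h 2 0).toNat).foldl
          (fun cnt r => pySet cnt (colOf r) (PySem.List.pyGetD cnt (colOf r) 0 + 1))
          (List.replicate (PySem.List.pyGetD h 1 0).toNat (0:Int)) := by
    rw [PySem.List.pyRepeat_singleton, ← map_pyGetD_cons_range h t _ hn, List.foldl_map]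
    rfl
  rw [hCNT]
  have hcntlen : ((t.take (PySem.List.pyGetD h 2 0).toNat).foldl
      (fun cnt r => pySet cnt (colOf r) (PySem.List.pyGetD cnt (colOf r) 0 + 1))
      (List.replicate (PySem.List.pyGetD h 1 0).toNat (0:Int))).length
      = (PySem.List.pyGetD h 1 0).toNat := by
    rw [count_fold_length, List.length_replicate]
  have hcnt : ∀ c : Nat, c < (PySem.List.pyGetD h 1 0).toNat →
      PySem.List.pyGetD ((t.take (PySem.List.pyGetD h 2 0).toNat).foldl
        (fun cnt r => pySet cnt (colOf r) (PySem.List.pyGetD cnt (colOf r) 0 + 1))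
        (List.replicate (PySem.List.pyGetD h 1 0).toNat (0:Int))) (c : Int) 0
      = (t.take (PySem.List.pyGetD h 2 0).toNat).countP (fun r => colOf r == (c : Int)) := by
    intro c hc
    rw [count_fold_getElem _ _ (by
        intro r hr
        have := hes r hr
        simp only [List.length_replicate]
        constructor
        · exact this.1
        · omega) (c : Int) (by omega) (by simp; omega)]
    rw [PySem.List.pyGetD_of_nonneg _ _ (by omega)]
    rw [Int.toNat_natCast, List.getD_replicate _ hc]
    simp
  -- the prefix-sum pass
  have hIDX0 : PySem.List.pyRepeat [(0 : Int)] (PySem.List.pyGetD h 1 0 + 1)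
      = List.replicate ((PySem.List.pyGetD h 1 0).toNat + 1) 0 := by
    rw [PySem.List.pyRepeat_singleton]
    congr 1
    omega
  rw [hIDX0]
  -- fill pass: header followed by n dummy rows
  have hFT1 : (PySem.List.pyRange 1 (PySem.List.pyGetD h 2 0 + 1)).foldl
      (fun ft _ => ft ++ [[0, 0, 0]])
      [[PySem.List.pyGetD h 1 0, PySem.List.pyGetD h 0 0, PySem.List.pyGetD h 2 0]]
      = [PySem.List.pyGetD h 1 0, PySem.List.pyGetD h 0 0, PySem.List.pyGetD h 2 0]
          :: List.replicate (t.take (PySem.List.pyGetD h 2 0).toNat).length ([0, 0, 0] : List Int) := by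
    rw [PySem.List.foldl_append_singleton_eq_map (fun _ : Int => ([0, 0, 0] : List Int))]
    rw [List.map_const', length_pyRange_one _ t h hn]
    rfl
  rw [hFT1]
  -- placement pass over the rows
  have hPLACE : ∀ (FT : List (List Int)) (IDX : List Int),
      (PySem.List.pyRange 1 (PySem.List.pyGetD h 2 0 + 1)).foldl
        (fun (st : List (List Int) × List Int) i =>
          (pySet st.1 (PySem.List.pyGetD st.2 (PySem.List.pyGetD (PySem.List.pyGetD (h :: t) i []) 1 0) 0)
              [PySem.List.pyGetD (PySem.List.pyGetD (h :: t) i []) 1 0,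
                PySem.List.pyGetD (PySem.List.pyGetD (h :: t) i []) 0 0,
                PySem.List.pyGetD (PySem.List.pyGetD (h :: t) i []) 2 0],
            pySet st.2 (PySem.List.pyGetD (PySem.List.pyGetD (h :: t) i []) 1 0)
              (PySem.List.pyGetD st.2 (PySem.List.pyGetD (PySem.List.pyGetD (h :: t) i []) 1 0) 0 + 1)))
        (FT, IDX)
      = (t.take (PySem.List.pyGetD h 2 0).toNat).foldl
          (fun (st : List (List Int) × List Int) r =>
            (pySet st.1 (PySem.List.pyGetD st.2 (colOf r) 0) (swapOf r),
             pySet st.2 (colOf r) (PySem.List.pyGetD st.2 (colOf r) 0 + 1))) (FT, IDX) := by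
    intro FT IDX
    rw [← map_pyGetD_cons_range h t _ hn, List.foldl_map]
    rfl
  rw [hPLACE, place_fold]
  -- the index table after the prefix-sum pass, and the final placement
  have hmcast : PySem.List.pyGetD h 1 0 = (((PySem.List.pyGetD h 1 0).toNat : Nat) : Int) :=
    (Int.toNat_of_nonneg hm).symm
  rw [hmcast]
  simp only [Int.toNat_natCast]
  have hIdef : (PySem.List.pyRange 1 ((((PySem.List.pyGetD h 1 0).toNat : Nat) : Int) + 1)).foldl
      (fun idx i => pySet idx i (PySem.List.pyGetD idx (i - 1) 0
        + PySem.List.pyGetD ((t.take (PySem.List.pyGetD h 2 0).toNat).foldl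
            (fun cnt r => pySet cnt (colOf r) (PySem.List.pyGetD cnt (colOf r) 0 + 1))
            (List.replicate (PySem.List.pyGetD h 1 0).toNat (0:Int))) (i - 1) 0))
      (pySet (List.replicate ((PySem.List.pyGetD h 1 0).toNat + 1) 0) 0 1)
      = idxFold ((t.take (PySem.List.pyGetD h 2 0).toNat).foldl
            (fun cnt r => pySet cnt (colOf r) (PySem.List.pyGetD cnt (colOf r) 0 + 1))
            (List.replicate (PySem.List.pyGetD h 1 0).toNat (0:Int)))
          (pySet (List.replicate ((PySem.List.pyGetD h 1 0).toNat + 1) 0) 0 1)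
          (((PySem.List.pyGetD h 1 0).toNat : Nat) : Int) := rfl
  rw [hIdef]
  apply place_eq_groups
  · exact hesN
  · rw [idxFold_length, pySet_length, List.length_replicate]
  · exact idxFold_getElem (PySem.List.pyGetD h 1 0).toNat _ _ hcntlen hcnt hes0
      (PySem.List.pyGetD h 1 0).toNat le_rfl

theorem fast_trans_spec : Claim_equal_fast_trans := by
  intro s _ hpre
  unfold Spec_fast_trans
  obtain ⟨hne, h3, hm, hn, hesall⟩ := hpre
  obtain ⟨h, t, rfl⟩ := List.exists_cons_of_ne_nil hne
  have hm' : 0 ≤ PySem.List.pyGetD h 1 0 := hm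
  have hn' : PySem.List.pyGetD h 2 0 ≤ (t.length : Int) := by
    have : ((h :: t).length : Int) = (t.length : Int) + 1 := by simp
    have hn2 : PySem.List.pyGetD (h :: t).headI 2 0 ≤ ((h :: t).length : Int) - 1 := hn
    rw [this] at hn2
    have : (h :: t).headI = h := rfl
    rw [this] at hn2
    omega
  have hes' : ∀ r ∈ t.take (PySem.List.pyGetD h 2 0).toNat,
      0 ≤ colOf r ∧ colOf r < PySem.List.pyGetD h 1 0 := by
    intro r hr
    have := hesall r hr
    exact ⟨this.2.1, this.2.2⟩
  rw [fast_trans_canon h t hm' hn' hes', fast_trans_alt_canon h t hm' hn']
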